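-- pv_equiv track=rewrite | github.com/mahmood726-cyber/qualsynth | qualsynth/partial_order.py | _zeta_polynomial
-- ===== SOURCE A (Python) =====
-- def _zeta_polynomial(ids, order, max_n=3):
--     """Compute Z(n) = number of multichains of length n.
--
--     Z(1) = number of elements
--     Z(2) = number of comparable pairs (including (x,x))
--     Z(n) = number of chains x_1 <= x_2 <= ... <= x_n
--     """
--     order_set = set(order)
--     poset_leq = set()
--     for x in ids:
--         poset_leq.add((x, x))
--     for (a, b) in order_set:
--         poset_leq.add((b, a))
--
--     zeta = {}
--     elements = list(ids)
--
--     zeta[1] = len(elements)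
--
--     if max_n >= 2:
--         # Z(2) = number of pairs (x, y) with x <= y (including x == y)
--         count = 0
--         for x in elements:
--             for y in elements:
--                 if (x, y) in poset_leq:
--                     count += 1
--         zeta[2] = count
--
--     if max_n >= 3:
--         # Z(3) = number of triples (x, y, z) with x <= y <= z
--         count = 0
--         for x in elements:
--             for y in elements:
--                 if (x, y) not in poset_leq:
--                     continue
--                 for z in elements:
--                     if (y, z) in poset_leq:
--                         count += 1
--         zeta[3] = count
--
--     return zeta
-- ===== SOURCE B (Python) =====
-- def _zeta_polynomial(ids, order, max_n=3):
--     """Z(n) via per-element in/out degrees: O(n^2) instead of A's O(n^3) triple loop."""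
--     leq = {(x, x) for x in ids} | {(b, a) for (a, b) in order}
--     elements = list(ids)
--     zeta = {1: len(elements)}
--     if max_n >= 2:
--         out = [sum(1 for y in elements if (x, y) in leq) for x in elements]
--         zeta[2] = sum(out)
--         if max_n >= 3:
--             ind = [sum(1 for w in elements if (w, y) in leq) for y in elements]
--             zeta[3] = sum(i * o for i, o in zip(ind, out))
--     return zeta
-- ===== Notes on version B (the rewrite author's own statement) =====
-- stated objective: faster
-- what changed: Z(2) and Z(3) are computed from per-element in/out-degree counts (Z(3) = sum over y of indeg(y)*outdeg(y)) instead of A's nested double and triple loops over all pairs/triples.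
import Mathlib
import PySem

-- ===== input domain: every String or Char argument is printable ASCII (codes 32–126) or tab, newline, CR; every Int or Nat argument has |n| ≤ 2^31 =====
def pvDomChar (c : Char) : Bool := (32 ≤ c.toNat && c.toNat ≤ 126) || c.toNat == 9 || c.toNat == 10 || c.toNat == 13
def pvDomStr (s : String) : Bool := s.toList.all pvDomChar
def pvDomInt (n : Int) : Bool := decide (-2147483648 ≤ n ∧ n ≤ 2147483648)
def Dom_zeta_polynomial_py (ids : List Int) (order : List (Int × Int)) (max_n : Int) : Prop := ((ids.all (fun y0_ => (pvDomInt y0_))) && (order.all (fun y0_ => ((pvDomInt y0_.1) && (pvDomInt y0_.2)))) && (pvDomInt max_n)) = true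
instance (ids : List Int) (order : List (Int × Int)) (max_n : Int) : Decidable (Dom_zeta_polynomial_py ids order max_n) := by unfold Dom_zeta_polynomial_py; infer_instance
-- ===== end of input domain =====

-- B replaces A's cubic triple loop for Z(3) by per-element in/out-degree counts
-- (Z(3) = Σ_y indeg(y)·outdeg(y)), dropping a factor of n (objective: faster, asymptotic).

-- ===== PORT A =====
def zeta_polynomial_py (ids : List Int) (order : List (Int × Int)) (max_n : Int) : List (Int × Int) :=
  let order_set : PySem.Set (Int × Int) := PySem.Set.ofList order
  let poset_leq : PySem.Set (Int × Int) :=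
    ids.foldl (fun s x => PySem.Set.add s (x, x)) PySem.Set.empty
  let poset_leq : PySem.Set (Int × Int) :=
    order_set.foldl (fun s p => PySem.Set.add s (p.2, p.1)) poset_leq
  let elements : List Int := ids
  let zeta : PySem.Dict Int Int := (PySem.Dict.empty).insert 1 (elements.length : Int)
  let zeta : PySem.Dict Int Int :=
    if 2 ≤ max_n then
      let count : Int := elements.foldl (fun c x =>
        elements.foldl (fun c y =>
          if PySem.Set.contains poset_leq (x, y) then c + 1 else c) c) 0
      zeta.insert 2 count
    else zeta
  let zeta : PySem.Dict Int Int :=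
    if 3 ≤ max_n then
      let count : Int := elements.foldl (fun c x =>
        elements.foldl (fun c y =>
          if PySem.Set.contains poset_leq (x, y) then
            elements.foldl (fun c z =>
              if PySem.Set.contains poset_leq (y, z) then c + 1 else c) c
          else c) c) 0
      zeta.insert 3 count
    else zeta
  zeta.items

-- ===== PORT B =====
def zeta_polynomial_py_alt (ids : List Int) (order : List (Int × Int)) (max_n : Int) : List (Int × Int) :=
  let leq : PySem.Set (Int × Int) :=
    PySem.Set.union (PySem.Set.ofList (ids.map (fun x => (x, x))))
      (order.map (fun p => (p.2, p.1)))
  let elements : List Int := ids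
  let zeta : PySem.Dict Int Int := (PySem.Dict.empty).insert 1 (elements.length : Int)
  if 2 ≤ max_n then
    let outd : List Int :=
      elements.map (fun x => ((elements.countP (fun y => PySem.Set.contains leq (x, y)) : Nat) : Int))
    let zeta : PySem.Dict Int Int := zeta.insert 2 outd.sum
    if 3 ≤ max_n then
      let ind : List Int :=
        elements.map (fun y => ((elements.countP (fun w => PySem.Set.contains leq (w, y)) : Nat) : Int))
      (zeta.insert 3 ((ind.zip outd).map (fun p => p.1 * p.2)).sum).items
    else zeta.items
  else zeta.items

-- ===== PRECONDITION & SPEC =====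
def Spec_zeta_polynomial_py (ids : List Int) (order : List (Int × Int)) (max_n : Int) (out : List (Int × Int)) : Prop := out = zeta_polynomial_py_alt ids order max_n
instance (ids : List Int) (order : List (Int × Int)) (max_n : Int) (out : List (Int × Int)) : Decidable (Spec_zeta_polynomial_py ids order max_n out) := by unfold Spec_zeta_polynomial_py; infer_instance

-- ===== CLAIM (what is proved, stated in full; the proofs are below) =====
def Claim_equal_zeta_polynomial_py : Prop := ∀ (ids : List Int) (order : List (Int × Int)) (max_n : Int), Dom_zeta_polynomial_py ids order max_n → Spec_zeta_polynomial_py ids order max_n (zeta_polynomial_py ids order max_n)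

-- ===== LEMMAS AND PROOFS =====

-- A's poset_leq and B's leq contain the same pairs, so the same membership tests succeed.
theorem pv_contains_eq (ids : List Int) (order : List (Int × Int)) (p : Int × Int) :
    PySem.Set.contains
      ((PySem.Set.ofList order).foldl (fun s q => PySem.Set.add s (q.2, q.1))
        (ids.foldl (fun s x => PySem.Set.add s (x, x)) PySem.Set.empty))
      p
    = PySem.Set.contains
        (PySem.Set.union (PySem.Set.ofList (ids.map (fun x => (x, x))))
          (order.map (fun q => (q.2, q.1)))) p := by
  rw [Bool.eq_iff_iff]
  rw [PySem.Set.contains_iff, PySem.Set.contains_iff]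
  rw [PySem.Set.mem_foldl_add (f := fun q : Int × Int => (q.2, q.1)),
      PySem.Set.mem_foldl_add (f := fun x : Int => (x, x))]
  simp only [PySem.Set.mem_union, PySem.Set.mem_ofList, List.mem_map, PySem.Set.empty,
    List.not_mem_nil, false_or]
  constructor
  · rintro (⟨x, hx, rfl⟩ | ⟨q, hq, rfl⟩)
    · exact Or.inl ⟨x, hx, rfl⟩
    · exact Or.inr ⟨q, hq, rfl⟩
  · rintro (⟨x, hx, rfl⟩ | ⟨q, hq, rfl⟩)
    · exact Or.inl ⟨x, hx, rfl⟩
    · exact Or.inr ⟨q, hq, rfl⟩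

-- a 0/1-counting loop threaded through an outer loop: Σ over the list of countP
theorem pv_z2 (L : PySem.Set (Int × Int)) (el : List Int) :
    el.foldl (fun c x => el.foldl (fun c y =>
        if PySem.Set.contains L (x, y) then c + 1 else c) c) 0
    = (el.map (fun x => ((el.countP (fun y => PySem.Set.contains L (x, y)) : Nat) : Int))).sum := by
  have h1 := PySem.List.foldl_congr_mem el
    (fun c x => el.foldl (fun c y => if PySem.Set.contains L (x, y) then c + 1 else c) c)
    (fun c x => c + ((el.countP (fun y => PySem.Set.contains L (x, y)) : Nat) : Int))
    0 (fun c x _ => PySem.List.foldl_if_add_one _ _ _)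
  rw [h1, PySem.List.foldl_add]
  simp

-- (countP p l) * k as a sum of guarded k's
theorem pv_countP_mul (l : List Int) (p : Int → Bool) (k : Int) :
    ((l.countP p : Nat) : Int) * k = (l.map (fun w => if p w then k else 0)).sum := by
  induction l with
  | nil => simp
  | cons w l ih =>
    by_cases h : p w <;> (simp [h, add_mul, ih]; try ring)

-- exchanging the order of a double list sum
theorem pv_sum_swap (l l' : List Int) (f : Int → Int → Int) :
    (l.map (fun x => (l'.map (fun y => f x y)).sum)).sum
    = (l'.map (fun y => (l.map (fun x => f x y)).sum)).sum := by
  induction l with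
  | nil => simp
  | cons x l ih =>
    simp only [List.map_cons, List.sum_cons, ih]
    rw [← PySem.List.sum_map_add_int]

-- A's triple loop for Z(3) equals B's Σ_y indeg(y)·outdeg(y)
theorem pv_z3 (L : PySem.Set (Int × Int)) (el : List Int) :
    el.foldl (fun c x => el.foldl (fun c y =>
        if PySem.Set.contains L (x, y) then
          el.foldl (fun c z => if PySem.Set.contains L (y, z) then c + 1 else c) c
        else c) c) 0
    = (((el.map (fun y => ((el.countP (fun w => PySem.Set.contains L (w, y)) : Nat) : Int))).zip
        (el.map (fun x => ((el.countP (fun y => PySem.Set.contains L (x, y)) : Nat) : Int)))).map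
        (fun p => p.1 * p.2)).sum := by
  -- the middle y-loop, from any accumulator c, sums outdegrees guarded by x ≤ y
  have hmid : ∀ (x c : Int),
      el.foldl (fun c y =>
        if PySem.Set.contains L (x, y) then
          el.foldl (fun c z => if PySem.Set.contains L (y, z) then c + 1 else c) c
        else c) c
      = c + (el.map (fun y => if PySem.Set.contains L (x, y) then
          ((el.countP (fun z => PySem.Set.contains L (y, z)) : Nat) : Int) else 0)).sum := by
    intro x c
    have h1 := PySem.List.foldl_congr_mem el
      (fun c y =>
        if PySem.Set.contains L (x, y) then
          el.foldl (fun c z => if PySem.Set.contains L (y, z) then c + 1 else c) c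
        else c)
      (fun c y => c + (if PySem.Set.contains L (x, y) then
          ((el.countP (fun z => PySem.Set.contains L (y, z)) : Nat) : Int) else 0))
      c (by
        intro c y _
        beta_reduce
        by_cases h : PySem.Set.contains L (x, y) = true
        · rw [if_pos h, if_pos h, PySem.List.foldl_if_add_one]
        · rw [if_neg h, if_neg h, add_zero])
    exact h1.trans (PySem.List.foldl_add _ _ _)
  have h2 := PySem.List.foldl_congr_mem el
    (fun c x => el.foldl (fun c y =>
        if PySem.Set.contains L (x, y) then
          el.foldl (fun c z => if PySem.Set.contains L (y, z) then c + 1 else c) c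
        else c) c)
    (fun c x => c + (el.map (fun y => if PySem.Set.contains L (x, y) then
        ((el.countP (fun z => PySem.Set.contains L (y, z)) : Nat) : Int) else 0)).sum)
    0 (fun c x _ => hmid x c)
  rw [h2, PySem.List.foldl_add]
  simp only [zero_add, List.zip_map']
  rw [pv_sum_swap el el (fun x y =>
    if PySem.Set.contains L (x, y) then
      ((el.countP (fun z => PySem.Set.contains L (y, z)) : Nat) : Int) else 0)]
  rw [List.map_map]
  congr 1
  apply List.map_congr_left
  intro y _
  exact (pv_countP_mul el (fun x => PySem.Set.contains L (x, y)) _).symm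

-- ===== VERDICT (by name: the statement is the Claim_ definition above) =====
theorem zeta_polynomial_py_spec : Claim_equal_zeta_polynomial_py := by
  intro ids order max_n _
  unfold Spec_zeta_polynomial_py zeta_polynomial_py zeta_polynomial_py_alt
  simp only [pv_contains_eq ids order]
  set L := PySem.Set.union (PySem.Set.ofList (ids.map (fun x => (x, x))))
      (order.map (fun p => (p.2, p.1))) with hL
  by_cases h3 : 3 ≤ max_n
  · have h2 : 2 ≤ max_n := by omega
    simp only [h2, h3, if_pos]
    rw [pv_z2 L ids, pv_z3 L ids]
  · by_cases h2 : 2 ≤ max_n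
    · simp only [h2, h3, if_pos, if_false]
      rw [pv_z2 L ids]
    · simp only [h2, h3, if_false]
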